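-- pv_equiv track=rewrite | github.com/pverma12394/knowledge_graph | ontology/disease_syn_enrich.py | synonym
-- ===== SOURCE A (Python) =====
-- def synonym(resp_dict,i,syns):
--     '''
--     Extract and organize synonyms for a disease term from the JSON response obtained from a BioPortal API request.
--
--     Args:
--         resp_dict (dict): The JSON response dictionary obtained from the API request.
--         i (int): The disease term associated with the response.
--         syns(dict): Disease and their associated synonyms will be stored as key-value pair.
--
--     Returns:
--         dict: A dictionary where the key is the disease term 'i' and the value is a list of synonyms (strings).
--
--     Note:
--         This function iterates through the 'collection' key in the provided JSON response dictionary
--         and extracts synonyms for the disease term specified by 'i'.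
--         It skips synonyms that contain a colon (':') in their text.
--     '''
--     for x in resp_dict['collection']:
--       str_to_skip = ':'
--       if 'synonym' in x:
--         s = x.get('synonym', [])
--         if not any([str_to_skip.lower() in word.lower() for word in s]):
--           syns[i]=s
--     return(syns)
-- ===== SOURCE B (Python) =====
-- def synonym(resp_dict, i, syns):
--     for x in reversed(resp_dict['collection']):
--         if 'synonym' in x:
--             s = x['synonym']
--             if all(':' not in w.lower() for w in s):
--                 syns[i] = s
--                 break
--     return syns
-- ===== Notes on version B (the rewrite author's own statement) =====
-- stated objective: alternative
-- what changed: A overwrites syns[i] with every qualifying colon-free synonym list, so only the last one survives; B scans the collection in reverse and stops at the first qualifying entry, replacing the exhaustive forward overwrite loop with an early-terminating reverse search.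
import Mathlib
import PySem

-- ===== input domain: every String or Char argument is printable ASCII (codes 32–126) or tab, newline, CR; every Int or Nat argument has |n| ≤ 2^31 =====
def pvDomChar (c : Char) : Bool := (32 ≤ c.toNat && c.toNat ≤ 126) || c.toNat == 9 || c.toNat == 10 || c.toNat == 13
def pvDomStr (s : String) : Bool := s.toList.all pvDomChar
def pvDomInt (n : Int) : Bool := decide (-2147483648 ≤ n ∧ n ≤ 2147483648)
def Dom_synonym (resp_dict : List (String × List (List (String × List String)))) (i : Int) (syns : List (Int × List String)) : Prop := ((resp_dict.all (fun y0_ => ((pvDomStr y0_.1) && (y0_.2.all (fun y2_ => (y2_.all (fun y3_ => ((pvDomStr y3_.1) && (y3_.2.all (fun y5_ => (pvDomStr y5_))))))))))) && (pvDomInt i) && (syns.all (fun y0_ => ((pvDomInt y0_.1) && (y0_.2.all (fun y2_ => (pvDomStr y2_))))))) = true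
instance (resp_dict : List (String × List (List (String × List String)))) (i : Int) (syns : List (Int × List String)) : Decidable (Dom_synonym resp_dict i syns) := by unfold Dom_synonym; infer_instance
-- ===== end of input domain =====

-- B replaces A's exhaustive forward scan (each qualifying entry overwrites syns[i]) with a
-- reverse early-terminating search for the last qualifying entry; equivalence is about the
-- return value (both Pythons also mutate `syns` in place to the same final state).


-- ===== PORT A =====
-- literal port of A: forward fold over resp_dict['collection']; every entry with a
-- 'synonym' key whose words are all colon-free overwrites syns[i]
def synonym (resp_dict : List (String × List (List (String × List String)))) (i : Int) (syns : List (Int × List String)) : List (Int × List String) :=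
  match PySem.Dict.get? (PySem.Dict.mk resp_dict) "collection" with
  | none => syns  -- Python raises KeyError here; excluded by Pre_synonym
  | some coll =>
    (coll.foldl (fun d x =>
        let str_to_skip := ":"
        if PySem.Dict.contains (PySem.Dict.mk x) "synonym" then
          let s := PySem.Dict.getD (PySem.Dict.mk x) "synonym" []
          if !((s.map (fun word => PySem.Str.isIn (PySem.Str.lower str_to_skip) (PySem.Str.lower word))).any id) then
            d.insert i s
          else d
        else d) (PySem.Dict.mk syns)).items

-- ===== PORT B =====
-- port of Source B's loop over reversed(collection): stop at the first entry whose 'synonym'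
-- list is colon-free; entries without the key or failing the test are skipped
def synAltScan (i : Int) (syns : PySem.Dict Int (List String)) : List (List (String × List String)) → PySem.Dict Int (List String)
  | [] => syns
  | x :: rest =>
    match PySem.Dict.get? (PySem.Dict.mk x) "synonym" with
    | some s =>
      if s.all (fun w => !(PySem.Str.isIn ":" (PySem.Str.lower w))) then syns.insert i s
      else synAltScan i syns rest
    | none => synAltScan i syns rest

def synonym_alt (resp_dict : List (String × List (List (String × List String)))) (i : Int) (syns : List (Int × List String)) : List (Int × List String) :=
  match PySem.Dict.get? (PySem.Dict.mk resp_dict) "collection" with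
  | none => syns
  | some coll => (synAltScan i (PySem.Dict.mk syns) coll.reverse).items

-- ===== PRECONDITION & SPEC =====
-- Python A raises KeyError when 'collection' is absent from resp_dict; exactly that is excluded.
def Pre_synonym (resp_dict : List (String × List (List (String × List String)))) (i : Int) (syns : List (Int × List String)) : Prop :=
  PySem.Dict.contains (PySem.Dict.mk resp_dict) "collection" = true
instance (resp_dict : List (String × List (List (String × List String)))) (i : Int) (syns : List (Int × List String)) : Decidable (Pre_synonym resp_dict i syns) := by unfold Pre_synonym; infer_instance

def pvWitness_synonym : (List (String × List (List (String × List String)))) × Int × (List (Int × List String)) :=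
  ([("collection", [[("synonym", ["flu", "grippe"])]])], 3, [(3, ["old"])])

def Spec_synonym (resp_dict : List (String × List (List (String × List String)))) (i : Int) (syns : List (Int × List String)) (out : List (Int × List String)) : Prop := out = synonym_alt resp_dict i syns
instance (resp_dict : List (String × List (List (String × List String)))) (i : Int) (syns : List (Int × List String)) (out : List (Int × List String)) : Decidable (Spec_synonym resp_dict i syns out) := by unfold Spec_synonym; infer_instance

-- ===== CLAIM (what is proved, stated in full; the proofs are below) =====
def Claim_equal_synonym : Prop := ∀ (resp_dict : List (String × List (List (String × List String)))) (i : Int) (syns : List (Int × List String)), Dom_synonym resp_dict i syns → Pre_synonym resp_dict i syns → Spec_synonym resp_dict i syns (synonym resp_dict i syns)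

-- ===== LEMMAS AND PROOFS =====

-- the "qualifying synonym list" of one collection entry, if any
def pvQual (x : List (String × List String)) : Option (List String) :=
  match PySem.Dict.get? (PySem.Dict.mk x) "synonym" with
  | some s => if s.all (fun w => !(PySem.Str.isIn ":" (PySem.Str.lower w))) then some s else none
  | none => none

theorem synAltScan_eq_findSome (i : Int) (d : PySem.Dict Int (List String)) (l : List (List (String × List String))) :
    synAltScan i d l = match l.findSome? pvQual with
      | some s => d.insert i s
      | none => d := by
  induction l with
  | nil => rfl
  | cons x rest ih =>
    simp only [synAltScan, List.findSome?_cons, pvQual]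
    cases h : PySem.Dict.get? (PySem.Dict.mk x) "synonym" with
    | none => exact ih
    | some s =>
      dsimp only
      cases hc : s.all (fun w => !(PySem.Str.isIn ":" (PySem.Str.lower w))) with
      | true => rfl
      | false => exact ih

theorem stepA_eq (i : Int) (d : PySem.Dict Int (List String)) (x : List (String × List String)) :
    (let str_to_skip := ":"
     if PySem.Dict.contains (PySem.Dict.mk x) "synonym" then
       let s := PySem.Dict.getD (PySem.Dict.mk x) "synonym" []
       if !((s.map (fun word => PySem.Str.isIn (PySem.Str.lower str_to_skip) (PySem.Str.lower word))).any id) then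
         d.insert i s
       else d
     else d)
    = match pvQual x with
      | some s => d.insert i s
      | none => d := by
  simp only [pvQual]
  cases h : PySem.Dict.get? (PySem.Dict.mk x) "synonym" with
  | none =>
    have hc : PySem.Dict.contains (PySem.Dict.mk x) "synonym" = false := by
      rw [PySem.Dict.contains_eq_isSome_get?, h]; rfl
    simp only [hc, Bool.false_eq_true, if_false]
  | some s =>
    have hc : PySem.Dict.contains (PySem.Dict.mk x) "synonym" = true := by
      rw [PySem.Dict.contains_eq_isSome_get?, h]; rfl
    have hg : PySem.Dict.getD (PySem.Dict.mk x) "synonym" [] = s :=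
      PySem.Dict.getD_of_get?_eq_some _ _ h
    have hlow : PySem.Str.lower ":" = ":" := rfl
    have hB : (!((s.map (fun word => PySem.Str.isIn ":" (PySem.Str.lower word))).any id))
        = s.all (fun w => !(PySem.Str.isIn ":" (PySem.Str.lower w))) := by
      simp [List.any_map, List.all_eq_not_any_not]
    simp only [hc, if_true, hg, hlow, hB]
    cases hq : s.all (fun w => !(PySem.Str.isIn ":" (PySem.Str.lower w))) with
    | true => rfl
    | false => rfl

theorem foldA_eq_scanRev (i : Int) (l : List (List (String × List String))) :
    ∀ d : PySem.Dict Int (List String),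
      l.foldl (fun d x => match pvQual x with
        | some s => d.insert i s
        | none => d) d
      = synAltScan i d l.reverse := by
  induction l with
  | nil => intro d; rfl
  | cons x rest ih =>
    intro d
    rw [List.foldl_cons, ih, List.reverse_cons,
        synAltScan_eq_findSome, synAltScan_eq_findSome, List.findSome?_append]
    cases hr : rest.reverse.findSome? pvQual with
    | some s =>
      simp only [Option.orElse_eq_orElse, Option.orElse]
      cases hx : pvQual x with
      | none => rfl
      | some s' => exact PySem.Dict.insert_insert_self d i s' s
    | none =>
      simp only [Option.orElse_eq_orElse, Option.orElse, List.findSome?]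
      cases hx : pvQual x with
      | none => rfl
      | some s' => rfl

-- ===== VERDICT (by name: the statement is the Claim_ definition above) =====
theorem synonym_spec : Claim_equal_synonym := by
  intro resp_dict i syns _ _
  unfold Spec_synonym synonym synonym_alt
  cases h : PySem.Dict.get? (PySem.Dict.mk resp_dict) "collection" with
  | none => rfl
  | some coll =>
    have hstep : (fun (d : PySem.Dict Int (List String)) (x : List (String × List String)) =>
        let str_to_skip := ":"
        if PySem.Dict.contains (PySem.Dict.mk x) "synonym" then
          let s := PySem.Dict.getD (PySem.Dict.mk x) "synonym" []
          if !((s.map (fun word => PySem.Str.isIn (PySem.Str.lower str_to_skip) (PySem.Str.lower word))).any id) then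
            d.insert i s
          else d
        else d)
      = (fun d x => match pvQual x with
        | some s => d.insert i s
        | none => d) := by
      funext d x
      exact stepA_eq i d x
    simp only [hstep]
    rw [foldA_eq_scanRev]
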